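-- pv_equiv track=rewrite | github.com/willeaton04/Inception | agentic_scraper.py | _extract_key_insights
-- ===== SOURCE A (Python) =====
-- from typing import List, Dict, Optional, Any
--
-- def _extract_key_insights(relevant_insights: List[Dict[str, Any]]) -> List[str]:
--     """Extract key insights from all relevant files"""
--     all_insights = []
--
--     for insight in relevant_insights:
--         # Add direct answers
--         for answer in insight.get('direct_answers', [])[:2]:
--             all_insights.append(f"[Direct] {answer}")
--
--         # Add key points
--         for point in insight.get('key_points', [])[:2]:
--             all_insights.append(f"[Finding] {point}")
--
--     # Deduplicate similar insights
--     unique_insights = []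
--     seen = set()
--
--     for insight in all_insights:
--         # Simple deduplication based on first 50 chars
--         key = insight[:50].lower()
--         if key not in seen:
--             seen.add(key)
--             unique_insights.append(insight)
--
--     return unique_insights[:10]  # Top 10 insights
-- ===== SOURCE B (Python) =====
-- def _extract_key_insights(relevant_insights):
--     """Single pass: tag, dedup and cap at 10 in one loop, stopping early."""
--     result = []
--     seen = set()
--     for insight in relevant_insights:
--         if len(result) == 10:
--             break
--         tagged = (["[Direct] " + a for a in insight.get('direct_answers', [])[:2]] +
--                   ["[Finding] " + p for p in insight.get('key_points', [])[:2]])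
--         for s in tagged:
--             if len(result) == 10:
--                 break
--             key = s[:50].lower()
--             if key not in seen:
--                 seen.add(key)
--                 result.append(s)
--     return result
-- ===== Notes on version B (the rewrite author's own statement) =====
-- stated objective: alternative
-- what changed: Replaces A's two phases (build the full tagged all_insights list, then a separate dedup pass plus a final [:10] slice) with one fused pass that tags, dedups and appends directly, breaking out of both loops as soon as 10 insights are collected.
import Mathlib
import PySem

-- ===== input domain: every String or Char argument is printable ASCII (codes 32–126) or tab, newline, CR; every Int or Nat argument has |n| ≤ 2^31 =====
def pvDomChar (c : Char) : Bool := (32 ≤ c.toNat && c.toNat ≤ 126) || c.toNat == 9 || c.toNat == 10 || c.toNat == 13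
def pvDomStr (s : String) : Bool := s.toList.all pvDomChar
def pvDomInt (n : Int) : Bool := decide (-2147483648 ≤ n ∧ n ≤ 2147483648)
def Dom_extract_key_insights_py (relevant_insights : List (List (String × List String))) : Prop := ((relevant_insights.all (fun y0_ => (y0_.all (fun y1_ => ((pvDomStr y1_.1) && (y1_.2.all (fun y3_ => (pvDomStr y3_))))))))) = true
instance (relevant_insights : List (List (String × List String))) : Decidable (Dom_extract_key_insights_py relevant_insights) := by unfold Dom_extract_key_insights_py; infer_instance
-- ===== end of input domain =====

-- B fuses A's collect / dedup / truncate phases into one early-stopping pass; same results, no speed claim.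

-- shared primitive: key = s[:50].lower()
def pvKey (s : String) : String := PySem.Str.lower (PySem.Str.slice s none (some 50))

-- shared primitive: insight.get(k, [])
def pvGet (ins : List (String × List String)) (k : String) : List String :=
  PySem.Dict.getD (PySem.Dict.mk ins) k []

-- ===== PORT A =====
def extract_key_insights_py (relevant_insights : List (List (String × List String))) : List String :=
  let all_insights : List String :=
    relevant_insights.foldl (fun acc ins =>
      let acc := (PySem.List.slice (pvGet ins "direct_answers") none (some 2)).foldl
          (fun a ans => a ++ ["[Direct] " ++ ans]) acc
      (PySem.List.slice (pvGet ins "key_points") none (some 2)).foldl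
          (fun a p => a ++ ["[Finding] " ++ p]) acc) []
  let r :=
    all_insights.foldl (fun (us : List String × PySem.Set String) insight =>
      let key := pvKey insight
      if key ∈ us.2 then us else (us.1 ++ [insight], PySem.Set.add us.2 key))
      ([], PySem.Set.empty)
  PySem.List.slice r.1 none (some 10)

-- ===== PORT B =====
-- Source B helper value: the tagged list built from one insight (the two comprehensions, concatenated)
def pvTagged (ins : List (String × List String)) : List String :=
  (PySem.List.slice (pvGet ins "direct_answers") none (some 2)).map (fun a => "[Direct] " ++ a)
  ++ (PySem.List.slice (pvGet ins "key_points") none (some 2)).map (fun p => "[Finding] " ++ p)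

-- Source B inner loop over the tagged strings ('break' = stop the recursion)
def pvInner : List String → PySem.Set String × List String → PySem.Set String × List String
  | [], st => st
  | s :: t, (seen, result) =>
    if result.length = 10 then (seen, result)
    else
      let key := pvKey s
      if key ∈ seen then pvInner t (seen, result)
      else pvInner t (PySem.Set.add seen key, result ++ [s])

-- Source B outer loop over the insights
def pvOuter : List (List (String × List String)) → PySem.Set String × List String → List String
  | [], (_, result) => result
  | ins :: t, (seen, result) =>
    if result.length = 10 then result
    else pvOuter t (pvInner (pvTagged ins) (seen, result))

def extract_key_insights_py_alt (relevant_insights : List (List (String × List String))) : List String :=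
  pvOuter relevant_insights (PySem.Set.empty, [])

-- ===== PRECONDITION & SPEC =====
def Spec_extract_key_insights_py (relevant_insights : List (List (String × List String))) (out : List String) : Prop := out = extract_key_insights_py_alt relevant_insights
instance (relevant_insights : List (List (String × List String))) (out : List String) : Decidable (Spec_extract_key_insights_py relevant_insights out) := by unfold Spec_extract_key_insights_py; infer_instance

-- ===== CLAIM (what is proved, stated in full; the proofs are below) =====
def Claim_equal_extract_key_insights_py : Prop := ∀ (relevant_insights : List (List (String × List String))), Dom_extract_key_insights_py relevant_insights → Spec_extract_key_insights_py relevant_insights (extract_key_insights_py relevant_insights)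

-- ===== LEMMAS AND PROOFS =====

-- A's dedup loop, written as structural recursion (proof helper)
def pvDedup : List String → PySem.Set String → List String
  | [], _ => []
  | x :: t, seen =>
    if pvKey x ∈ seen then pvDedup t seen else x :: pvDedup t (PySem.Set.add seen (pvKey x))

-- the seen-set after scanning xs (adds are no-ops on present keys, so unconditional)
def pvSeen (xs : List String) (seen : PySem.Set String) : PySem.Set String :=
  xs.foldl (fun s x => PySem.Set.add s (pvKey x)) seen

theorem pvDedup_append (xs ys : List String) (seen : PySem.Set String) :
    pvDedup (xs ++ ys) seen = pvDedup xs seen ++ pvDedup ys (pvSeen xs seen) := by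
  induction xs generalizing seen with
  | nil => simp [pvDedup, pvSeen]
  | cons x t ih =>
    by_cases h : pvKey x ∈ seen
    · simp [pvDedup, h, ih, pvSeen]
    · simp [pvDedup, h, ih, pvSeen]

theorem pvSeen_of_dedup_nil (xs : List String) (seen : PySem.Set String)
    (h : pvDedup xs seen = []) : pvSeen xs seen = seen := by
  induction xs generalizing seen with
  | nil => simp [pvSeen]
  | cons x t ih =>
    by_cases hm : pvKey x ∈ seen
    · simp only [pvDedup, if_pos hm] at h
      simpa [pvSeen, PySem.Set.add_of_mem hm] using ih seen h
    · simp [pvDedup, hm] at h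

theorem pvFoldA (l : List String) (u : List String) (seen : PySem.Set String) :
    (l.foldl (fun (us : List String × PySem.Set String) insight =>
      let key := pvKey insight
      if key ∈ us.2 then us else (us.1 ++ [insight], PySem.Set.add us.2 key)) (u, seen)).1
    = u ++ pvDedup l seen := by
  induction l generalizing u seen with
  | nil => simp [pvDedup]
  | cons x t ih =>
    by_cases h : pvKey x ∈ seen
    · simp [pvDedup, h, ih]
    · simp [pvDedup, h, ih]

-- the inner loop computes the truncated dedup, and below the cap it is exactly the dedup
theorem pvInner_spec (xs : List String) (seen : PySem.Set String) (res : List String)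
    (hle : res.length ≤ 10) :
    (pvInner xs (seen, res)).2 = (res ++ pvDedup xs seen).take 10
    ∧ ((res ++ pvDedup xs seen).length ≤ 10 →
        pvInner xs (seen, res) = (pvSeen xs seen, res ++ pvDedup xs seen)) := by
  induction xs generalizing seen res with
  | nil =>
    constructor
    · simp [pvInner, pvDedup, List.take_of_length_le hle]
    · intro _; simp [pvInner, pvDedup, pvSeen]
  | cons x t ih =>
    by_cases h10 : res.length = 10
    · constructor
      · simp only [pvInner, if_pos h10]
        rw [← h10, List.take_left]
      · intro hlen
        have hd : pvDedup (x :: t) seen = [] := by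
          have := List.length_append (as := res) (bs := pvDedup (x :: t) seen)
          have : (pvDedup (x :: t) seen).length = 0 := by omega
          exact List.eq_nil_of_length_eq_zero this
        by_cases hm : pvKey x ∈ seen
        · simp only [pvDedup, if_pos hm] at hd
          have hs : pvSeen (x :: t) seen = seen := by
            have := pvSeen_of_dedup_nil t seen hd
            simpa [pvSeen, PySem.Set.add_of_mem hm] using this
          simp [pvInner, h10, pvDedup, hm, hd, hs]
        · simp [pvDedup, hm] at hd
    · have hlt : res.length < 10 := by omega
      by_cases hm : pvKey x ∈ seen
      · have := ih seen res hle
        constructor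
        · simpa [pvInner, h10, pvDedup, hm] using this.1
        · intro hlen
          simp only [pvDedup, if_pos hm] at hlen
          have h2 := this.2 hlen
          simp [pvInner, h10, pvDedup, hm, h2, pvSeen]
      · have hle' : (res ++ [x]).length ≤ 10 := by simp; omega
        have := ih (PySem.Set.add seen (pvKey x)) (res ++ [x]) hle'
        constructor
        · simpa [pvInner, h10, pvDedup, hm, List.append_assoc] using this.1
        · intro hlen
          simp only [pvDedup, if_neg hm] at hlen
          have hlen' : ((res ++ [x]) ++ pvDedup t (PySem.Set.add seen (pvKey x))).length ≤ 10 := by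
            simp at hlen ⊢; omega
          have h2 := this.2 hlen'
          have hstep : pvInner (x :: t) (seen, res)
              = pvInner t (PySem.Set.add seen (pvKey x), res ++ [x]) := by
            simp only [pvInner, if_neg h10, if_neg hm]
          rw [hstep, h2]
          simp only [pvDedup, if_neg hm, pvSeen, List.foldl_cons, List.append_assoc,
            List.singleton_append]

theorem pvOuter_full (t : List (List (String × List String))) (s : PySem.Set String)
    (res : List String) (h10 : res.length = 10) : pvOuter t (s, res) = res := by
  cases t with
  | nil => simp [pvOuter]
  | cons a b => simp [pvOuter, h10]

theorem pvOuter_spec (l : List (List (String × List String))) (seen : PySem.Set String)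
    (res : List String) (hle : res.length ≤ 10) :
    pvOuter l (seen, res) = (res ++ pvDedup (l.flatMap pvTagged) seen).take 10 := by
  induction l generalizing seen res with
  | nil => simp [pvOuter, pvDedup, List.take_of_length_le hle]
  | cons ins t ih =>
    by_cases h10 : res.length = 10
    · simp only [pvOuter, if_pos h10]
      rw [← h10, List.take_left]
    · simp only [pvOuter, if_neg h10, List.flatMap_cons, pvDedup_append, ← List.append_assoc]
      have hle' : res.length ≤ 10 := hle
      have hspec := pvInner_spec (pvTagged ins) seen res hle'
      by_cases hfit : (res ++ pvDedup (pvTagged ins) seen).length ≤ 10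
      · rw [hspec.2 hfit, ih _ _ hfit]
      · rcases hI : pvInner (pvTagged ins) (seen, res) with ⟨s', r'⟩
        have hr' : r' = (res ++ pvDedup (pvTagged ins) seen).take 10 := by
          have := hspec.1; rw [hI] at this; exact this
        have hlen : r'.length = 10 := by
          rw [hr', List.length_take]; omega
        rw [pvOuter_full t s' r' hlen, List.take_append_of_le_length (by omega), hr']

theorem pvAll_eq (l : List (List (String × List String))) (acc : List String) :
    l.foldl (fun acc ins =>
      let acc := (PySem.List.slice (pvGet ins "direct_answers") none (some 2)).foldl
          (fun a ans => a ++ ["[Direct] " ++ ans]) acc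
      (PySem.List.slice (pvGet ins "key_points") none (some 2)).foldl
          (fun a p => a ++ ["[Finding] " ++ p]) acc) acc
    = acc ++ l.flatMap pvTagged := by
  induction l generalizing acc with
  | nil => simp
  | cons ins t ih =>
    simp only [List.foldl_cons, ih, List.flatMap_cons]
    rw [PySem.List.foldl_append_singleton_eq_map, PySem.List.foldl_append_singleton_eq_map]
    simp [pvTagged, List.append_assoc]

-- ===== VERDICT (by name: the statement is the Claim_ definition above) =====
theorem extract_key_insights_py_spec : Claim_equal_extract_key_insights_py := by
  intro ri _
  unfold Spec_extract_key_insights_py extract_key_insights_py extract_key_insights_py_alt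
  simp only [pvAll_eq, pvFoldA, List.nil_append]
  rw [pvOuter_spec ri PySem.Set.empty [] (by simp), List.nil_append,
    show ((10:Int)) = ((10:Nat):Int) by norm_num, PySem.List.slice_to_natCast]
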